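-- pv_equiv track=rewrite | github.com/parkminh0/Programmers | Lv. 0/응알이 (1).py | solution
-- ===== SOURCE A (Python) =====
-- def solution(babbling):
--     answer = 0
--     tmp = ['aya', 'ye', 'woo', 'ma']
--     for i in babbling:
--         test = ''
--         for j in i:
--             test += j
--             if test in tmp:
--                 test = ''
--         if test == '':
--             answer += 1
--
--     return answer
-- ===== SOURCE B (Python) =====
-- def solution(babbling):
--     def ok(w):
--         if w == '':
--             return True
--         return ((w.startswith('aya') and ok(w[3:])) or
--                 (w.startswith('ye') and ok(w[2:])) or
--                 (w.startswith('woo') and ok(w[3:])) or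
--                 (w.startswith('ma') and ok(w[2:])))
--     return sum(1 for w in babbling if ok(w))
-- ===== Notes on version B (the rewrite author's own statement) =====
-- stated objective: alternative
-- what changed: Replaced A's character-by-character buffer accumulation with reset-on-token-match by a recursive descent tokenizer that tries each of the four token prefixes at the current position; the buffer state machine disappears entirely.
import Mathlib
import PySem

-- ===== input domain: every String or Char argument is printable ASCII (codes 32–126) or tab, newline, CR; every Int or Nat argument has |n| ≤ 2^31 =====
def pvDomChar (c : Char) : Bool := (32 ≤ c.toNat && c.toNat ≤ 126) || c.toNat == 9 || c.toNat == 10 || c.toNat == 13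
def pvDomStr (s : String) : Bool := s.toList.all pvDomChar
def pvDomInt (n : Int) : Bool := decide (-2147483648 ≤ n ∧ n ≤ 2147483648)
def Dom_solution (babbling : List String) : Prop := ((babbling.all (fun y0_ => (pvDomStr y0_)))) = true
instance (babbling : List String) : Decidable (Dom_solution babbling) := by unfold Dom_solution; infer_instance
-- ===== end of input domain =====

-- B differs from A structurally: A maintains a growing buffer reset on token match; B is a
-- recursive tokenizer trying each token prefix at the current position. Same return values.

-- ===== PORT A =====
-- strings are modeled as List Char (test += j / membership / equality are exact on lists)
def stepChar (test : List Char) (j : Char) : List Char :=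
  let test := test ++ [j]
  if test = ['a','y','a'] ∨ test = ['y','e'] ∨ test = ['w','o','o'] ∨ test = ['m','a']
  then [] else test

def solution (babbling : List String) : Int :=
  babbling.foldl (fun answer i =>
    let test := i.toList.foldl stepChar []
    if test = [] then answer + 1 else answer) 0

-- ===== PORT B =====
def okB (w : List Char) : Bool :=
  if h : w = [] then true
  else
    (List.isPrefixOf ['a','y','a'] w && okB (w.drop 3)) ||
    (List.isPrefixOf ['y','e'] w && okB (w.drop 2)) ||
    (List.isPrefixOf ['w','o','o'] w && okB (w.drop 3)) ||
    (List.isPrefixOf ['m','a'] w && okB (w.drop 2))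
termination_by w.length
decreasing_by
  all_goals
    (have : 0 < w.length := List.length_pos_iff.mpr h
     simp [List.length_drop]; omega)

def solution_alt (babbling : List String) : Int :=
  (babbling.countP (fun w => okB w.toList) : Int)

-- ===== PRECONDITION & SPEC =====
def Spec_solution (babbling : List String) (out : Int) : Prop := out = solution_alt babbling
instance (babbling : List String) (out : Int) : Decidable (Spec_solution babbling out) := by unfold Spec_solution; infer_instance

-- ===== CLAIM (what is proved, stated in full; the proofs are below) =====
def Claim_equal_solution : Prop := ∀ (babbling : List String), Dom_solution babbling → Spec_solution babbling (solution babbling)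

-- ===== LEMMAS AND PROOFS =====

-- stuck states: once the buffer is nonempty and not a proper prefix of any token, it never resets
def pvP : List (List Char) := [[], ['a'], ['a','y'], ['y'], ['w'], ['w','o'], ['m']]

theorem stepChar_stuck (t : List Char) (j : Char) (h : t ∉ pvP) : stepChar t j ∉ pvP := by
  unfold stepChar
  dsimp only
  split
  · rename_i h'
    exfalso; apply h
    rcases t with _|⟨a,_|⟨b,_|⟨c,t⟩⟩⟩ <;> simp_all [pvP] <;> tauto
  · intro hmem
    apply h
    rcases t with _|⟨a,_|⟨b,t⟩⟩ <;> simp_all [pvP]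

theorem foldl_stuck (w : List Char) : ∀ t, t ∉ pvP → List.foldl stepChar t w ∉ pvP := by
  induction w with
  | nil => intro t h; simpa using h
  | cons c r ih => intro t h; exact ih _ (stepChar_stuck t c h)

theorem foldl_stuck_ne (w t : List Char) (h : t ∉ pvP) : List.foldl stepChar t w ≠ [] := by
  intro he
  exact foldl_stuck w t h (by rw [he]; simp [pvP])

theorem key : ∀ (n : ℕ) (w : List Char), w.length ≤ n →
    ((List.foldl stepChar [] w = []) ↔ okB w = true) := by
  intro n
  induction n with
  | zero =>
    intro w hw
    have : w = [] := List.eq_nil_of_length_eq_zero (Nat.le_zero.mp hw)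
    subst this; simp [okB]
  | succ n ih =>
    intro w hw
    rcases w with _ | ⟨c, rest⟩
    · simp [okB]
    · by_cases hc : c = 'a' ∨ c = 'y' ∨ c = 'w' ∨ c = 'm'
      · rcases hc with hc | hc | hc | hc <;> subst hc
        · -- 'a'
          rcases rest with _ | ⟨d, rest⟩
          · constructor <;> intro hfalse
            · exact absurd hfalse (by decide)
            · rw [okB] at hfalse; simp [List.isPrefixOf] at hfalse
          · by_cases hd : d = 'y'
            · subst hd
              rcases rest with _ | ⟨e, rest⟩
              · constructor <;> intro hfalse
                · exact absurd hfalse (by decide)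
                · rw [okB] at hfalse; simp [List.isPrefixOf] at hfalse
              · by_cases he : e = 'a'
                · subst he
                  have hL : List.foldl stepChar [] ('a'::'y'::'a'::rest) =
                      List.foldl stepChar [] rest := by
                    simp only [List.foldl_cons]; simp [stepChar]
                  rw [hL]
                  rw [ih rest (by simp at hw ⊢; omega)]
                  conv_rhs => rw [okB]
                  simp [List.isPrefixOf]
                · constructor <;> intro hfalse
                  · exfalso
                    have hst : List.foldl stepChar [] ('a'::'y'::e::rest) =
                        List.foldl stepChar ['a','y',e] rest := by
                      simp only [List.foldl_cons]; simp [stepChar, he]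
                    rw [hst] at hfalse
                    exact foldl_stuck_ne rest ['a','y',e]
                      (by simp [pvP, he]) hfalse
                  · exfalso
                    rw [okB] at hfalse
                    simp [List.isPrefixOf, Ne.symm he] at hfalse
            · constructor <;> intro hfalse
              · exfalso
                have hst : List.foldl stepChar [] ('a'::d::rest) =
                    List.foldl stepChar ['a',d] rest := by
                  simp only [List.foldl_cons]; simp [stepChar, hd]
                rw [hst] at hfalse
                exact foldl_stuck_ne rest ['a',d] (by simp [pvP, hd]) hfalse
              · exfalso
                rw [okB] at hfalse
                simp [List.isPrefixOf, Ne.symm hd] at hfalse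
        · -- 'y'
          rcases rest with _ | ⟨d, rest⟩
          · constructor <;> intro hfalse
            · exact absurd hfalse (by decide)
            · rw [okB] at hfalse; simp [List.isPrefixOf] at hfalse
          · by_cases hd : d = 'e'
            · subst hd
              have hL : List.foldl stepChar [] ('y'::'e'::rest) =
                  List.foldl stepChar [] rest := by
                simp only [List.foldl_cons]; simp [stepChar]
              rw [hL]
              rw [ih rest (by simp at hw ⊢; omega)]
              conv_rhs => rw [okB]
              simp [List.isPrefixOf]
            · constructor <;> intro hfalse
              · exfalso
                have hst : List.foldl stepChar [] ('y'::d::rest) =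
                    List.foldl stepChar ['y',d] rest := by
                  simp only [List.foldl_cons]; simp [stepChar, hd]
                rw [hst] at hfalse
                exact foldl_stuck_ne rest ['y',d] (by simp [pvP, hd]) hfalse
              · exfalso
                rw [okB] at hfalse
                simp [List.isPrefixOf, Ne.symm hd] at hfalse
        · -- 'w'
          rcases rest with _ | ⟨d, rest⟩
          · constructor <;> intro hfalse
            · exact absurd hfalse (by decide)
            · rw [okB] at hfalse; simp [List.isPrefixOf] at hfalse
          · by_cases hd : d = 'o'
            · subst hd
              rcases rest with _ | ⟨e, rest⟩
              · constructor <;> intro hfalse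
                · exact absurd hfalse (by decide)
                · rw [okB] at hfalse; simp [List.isPrefixOf] at hfalse
              · by_cases he : e = 'o'
                · subst he
                  have hL : List.foldl stepChar [] ('w'::'o'::'o'::rest) =
                      List.foldl stepChar [] rest := by
                    simp only [List.foldl_cons]; simp [stepChar]
                  rw [hL]
                  rw [ih rest (by simp at hw ⊢; omega)]
                  conv_rhs => rw [okB]
                  simp [List.isPrefixOf]
                · constructor <;> intro hfalse
                  · exfalso
                    have hst : List.foldl stepChar [] ('w'::'o'::e::rest) =
                        List.foldl stepChar ['w','o',e] rest := by
                      simp only [List.foldl_cons]; simp [stepChar, he]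
                    rw [hst] at hfalse
                    exact foldl_stuck_ne rest ['w','o',e]
                      (by simp [pvP, he]) hfalse
                  · exfalso
                    rw [okB] at hfalse
                    simp [List.isPrefixOf, Ne.symm he] at hfalse
            · constructor <;> intro hfalse
              · exfalso
                have hst : List.foldl stepChar [] ('w'::d::rest) =
                    List.foldl stepChar ['w',d] rest := by
                  simp only [List.foldl_cons]; simp [stepChar, hd]
                rw [hst] at hfalse
                exact foldl_stuck_ne rest ['w',d] (by simp [pvP, hd]) hfalse
              · exfalso
                rw [okB] at hfalse
                simp [List.isPrefixOf, Ne.symm hd] at hfalse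
        · -- 'm'
          rcases rest with _ | ⟨d, rest⟩
          · constructor <;> intro hfalse
            · exact absurd hfalse (by decide)
            · rw [okB] at hfalse; simp [List.isPrefixOf] at hfalse
          · by_cases hd : d = 'a'
            · subst hd
              have hL : List.foldl stepChar [] ('m'::'a'::rest) =
                  List.foldl stepChar [] rest := by
                simp only [List.foldl_cons]; simp [stepChar]
              rw [hL]
              rw [ih rest (by simp at hw ⊢; omega)]
              conv_rhs => rw [okB]
              simp [List.isPrefixOf]
            · constructor <;> intro hfalse
              · exfalso
                have hst : List.foldl stepChar [] ('m'::d::rest) =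
                    List.foldl stepChar ['m',d] rest := by
                  simp only [List.foldl_cons]; simp [stepChar, hd]
                rw [hst] at hfalse
                exact foldl_stuck_ne rest ['m',d] (by simp [pvP, hd]) hfalse
              · exfalso
                rw [okB] at hfalse
                simp [List.isPrefixOf, Ne.symm hd] at hfalse
      · push_neg at hc
        obtain ⟨h1, h2, h3, h4⟩ := hc
        constructor <;> intro hfalse
        · exfalso
          have hst : List.foldl stepChar [] (c::rest) =
              List.foldl stepChar [c] rest := by
            simp only [List.foldl_cons]; simp [stepChar]
          rw [hst] at hfalse
          exact foldl_stuck_ne rest [c] (by simp [pvP, h1, h2, h3, h4]) hfalse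
        · exfalso
          rw [okB] at hfalse
          simp [List.isPrefixOf, Ne.symm h1, Ne.symm h2, Ne.symm h3, Ne.symm h4] at hfalse

theorem key' (w : List Char) : (List.foldl stepChar [] w = []) ↔ okB w = true :=
  key w.length w le_rfl

theorem solution_acc (babbling : List String) : ∀ (acc : Int),
    babbling.foldl (fun answer i =>
      let test := i.toList.foldl stepChar []
      if test = [] then answer + 1 else answer) acc
    = acc + (babbling.countP (fun w => okB w.toList) : Int) := by
  induction babbling with
  | nil => intro acc; simp
  | cons s rest ih =>
    intro acc
    simp only [List.foldl_cons, List.countP_cons]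
    by_cases h : List.foldl stepChar [] s.toList = []
    · have hb : okB s.toList = true := (key' s.toList).mp h
      simp [h, hb, ih]; ring
    · have hb : okB s.toList = false := by
        cases hx : okB s.toList
        · rfl
        · exact absurd ((key' s.toList).mpr hx) h
      simp [h, hb, ih]

-- ===== VERDICT (by name: the statement is the Claim_ definition above) =====
theorem solution_spec : Claim_equal_solution := by
  intro babbling _
  unfold Spec_solution solution solution_alt
  simpa using solution_acc babbling 0
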